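-- pv_equiv track=rewrite | github.com/adeetya02/LeafLoafLangGraph | src/agents/conversational_agent.py | _has_quantity
-- ===== SOURCE A (Python) =====
-- def _has_quantity(transcript: str) -> bool:
--     """Check if transcript contains quantity"""
--     quantity_indicators = [
--         "one", "two", "three", "four", "five", "six", "seven", "eight", "nine", "ten",
--         "1", "2", "3", "4", "5", "6", "7", "8", "9", "10",
--         "dozen", "pound", "pounds", "lb", "lbs", "kg", "gallon", "quart", "pint",
--         "bunch", "bag", "box", "pack", "package"
--     ]
--     return any(q in transcript.lower() for q in quantity_indicators)
-- ===== SOURCE B (Python) =====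
-- def _has_quantity(transcript: str) -> bool:
--     t = transcript.lower()
--     # Any digit 1-9 covers the numeric indicators "1".."9" and "10".
--     if any(c in "123456789" for c in t):
--         return True
--     # Deduplicated word tokens: "pounds"/"lbs"/"package" are covered by
--     # their prefixes "pound"/"lb"/"pack".
--     words = ("one", "two", "three", "four", "five", "six", "seven", "eight",
--              "nine", "ten", "dozen", "pound", "lb", "kg", "gallon", "quart",
--              "pint", "bunch", "bag", "box", "pack")
--     return any(t.startswith(words, i) for i in range(len(t)))
-- ===== Notes on version B (the rewrite author's own statement) =====
-- stated objective: alternative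
-- what changed: Replaces the indicator-major loop of 34 repeated substring searches by a single digit-character scan (covering all ten numeric indicators) plus one position-major startswith scan over a deduplicated 21-token word list.
import Mathlib
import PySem

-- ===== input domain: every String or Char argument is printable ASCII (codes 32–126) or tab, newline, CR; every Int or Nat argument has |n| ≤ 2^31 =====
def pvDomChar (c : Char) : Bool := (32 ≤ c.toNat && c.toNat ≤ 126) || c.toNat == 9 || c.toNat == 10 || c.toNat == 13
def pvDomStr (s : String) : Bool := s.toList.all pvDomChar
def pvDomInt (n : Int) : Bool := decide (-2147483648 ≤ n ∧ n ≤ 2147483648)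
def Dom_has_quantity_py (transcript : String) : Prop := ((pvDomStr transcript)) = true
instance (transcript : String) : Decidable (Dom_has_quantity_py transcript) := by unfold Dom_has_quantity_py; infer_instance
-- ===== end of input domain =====

-- B replaces the indicator-major repeated substring scans by one digit-character scan
-- plus a single position-major startswith scan over a deduplicated token list (objective: alternative).


-- ===== PORT A =====
def pvIndicators : List String :=
  ["one", "two", "three", "four", "five", "six", "seven", "eight", "nine", "ten",
   "1", "2", "3", "4", "5", "6", "7", "8", "9", "10",
   "dozen", "pound", "pounds", "lb", "lbs", "kg", "gallon", "quart", "pint",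
   "bunch", "bag", "box", "pack", "package"]

def has_quantity_py (transcript : String) : Bool :=
  pvIndicators.any (fun q => PySem.Str.isIn q (PySem.Str.lower transcript))

-- ===== PORT B =====
def pvDigits : List Char := ['1', '2', '3', '4', '5', '6', '7', '8', '9']

def pvWords : List (List Char) :=
  ["one".toList, "two".toList, "three".toList, "four".toList, "five".toList,
   "six".toList, "seven".toList, "eight".toList, "nine".toList, "ten".toList,
   "dozen".toList, "pound".toList, "lb".toList, "kg".toList, "gallon".toList,
   "quart".toList, "pint".toList, "bunch".toList, "bag".toList, "box".toList,
   "pack".toList]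

-- the loop 'any(t.startswith(words, i) for i in range(len(t)))', one suffix per i
def pvScan : List Char → Bool
  | [] => false
  | c :: tl => pvWords.any (fun w => PySem.Chars.startswith (c :: tl) w) || pvScan tl

def has_quantity_py_alt (transcript : String) : Bool :=
  if (PySem.Str.lower transcript).toList.any (fun c => pvDigits.contains c) then true
  else pvScan (PySem.Str.lower transcript).toList

-- ===== PRECONDITION & SPEC =====
def Spec_has_quantity_py (transcript : String) (out : Bool) : Prop := out = has_quantity_py_alt transcript
instance (transcript : String) (out : Bool) : Decidable (Spec_has_quantity_py transcript out) := by unfold Spec_has_quantity_py; infer_instance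

-- ===== CLAIM (what is proved, stated in full; the proofs are below) =====
def Claim_equal_has_quantity_py : Prop := ∀ (transcript : String), Dom_has_quantity_py transcript → Spec_has_quantity_py transcript (has_quantity_py transcript)

-- ===== LEMMAS AND PROOFS =====

theorem pvScan_iff (cs : List Char) :
    pvScan cs = true ↔ ∃ w ∈ pvWords, w <:+: cs := by
  induction cs with
  | nil => decide
  | cons c tl ih =>
    simp only [pvScan, Bool.or_eq_true, List.any_eq_true, PySem.Chars.startswith_iff, ih]
    constructor
    · rintro (⟨w, hw, hp⟩ | ⟨w, hw, hi⟩)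
      · exact ⟨w, hw, hp.isInfix⟩
      · exact ⟨w, hw, hi.trans (List.suffix_cons c tl).isInfix⟩
    · rintro ⟨w, hw, hi⟩
      rcases List.infix_cons_iff.mp hi with hp | hi'
      · exact Or.inl ⟨w, hw, hp⟩
      · exact Or.inr ⟨w, hw, hi'⟩

theorem pv_main (lc : List Char) :
    (∃ q ∈ pvIndicators, q.toList <:+: lc) ↔
      ((∃ c ∈ lc, c ∈ pvDigits) ∨ ∃ w ∈ pvWords, w <:+: lc) := by
  constructor
  · rintro ⟨q, hq, hinf⟩
    have h : (pvIndicators.all fun q =>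
        (pvDigits.any fun c => decide ([c] <:+: q.toList)) ||
        (pvWords.any fun w => decide (w <:+: q.toList))) = true := by decide
    have h2 := List.all_eq_true.mp h q hq
    rw [Bool.or_eq_true] at h2
    rcases h2 with h1 | h1
    · obtain ⟨c, hc, hci⟩ := List.any_eq_true.mp h1
      exact Or.inl ⟨c,
        List.IsInfix.mem (by simp) ((of_decide_eq_true hci).trans hinf), hc⟩
    · obtain ⟨w, hw, hwi⟩ := List.any_eq_true.mp h1
      exact Or.inr ⟨w, hw, (of_decide_eq_true hwi).trans hinf⟩
  · rintro (⟨c, hc, hd⟩ | ⟨w, hw, hi⟩)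
    · have h : (pvDigits.all fun c =>
          pvIndicators.any fun q => q.toList == [c]) = true := by decide
      obtain ⟨q, hq, he⟩ := List.any_eq_true.mp (List.all_eq_true.mp h c hd)
      exact ⟨q, hq, (eq_of_beq he) ▸ (List.singleton_infix_iff c lc).mpr hc⟩
    · have h : (pvWords.all fun w =>
          pvIndicators.any fun q => q.toList == w) = true := by decide
      obtain ⟨q, hq, he⟩ := List.any_eq_true.mp (List.all_eq_true.mp h w hw)
      exact ⟨q, hq, (eq_of_beq he) ▸ hi⟩

-- ===== VERDICT (by name: the statement is the Claim_ definition above) =====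
theorem has_quantity_py_spec : Claim_equal_has_quantity_py := by
  intro t _
  unfold Spec_has_quantity_py has_quantity_py has_quantity_py_alt
  rw [Bool.eq_iff_iff]
  cases hdig : (PySem.Str.lower t).toList.any (fun c => pvDigits.contains c) with
  | true =>
    rw [if_pos rfl]
    refine iff_of_true ?_ rfl
    obtain ⟨c, hc, hcd⟩ := List.any_eq_true.mp hdig
    rw [List.contains_iff_mem] at hcd
    exact List.any_eq_true.mpr
      (((pv_main _).mpr (Or.inl ⟨c, hc, hcd⟩)).imp
        (fun q hq => ⟨hq.1, (PySem.Str.isIn_iff_infix _ _).mpr hq.2⟩))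
  | false =>
    rw [if_neg (by simp)]
    simp only [List.any_eq_true, PySem.Str.isIn_iff_infix]
    rw [pvScan_iff, pv_main]
    constructor
    · rintro (⟨c, hc, hcd⟩ | h)
      · have h1 : ((PySem.Str.lower t).toList.any fun c => pvDigits.contains c) = true :=
          List.any_eq_true.mpr ⟨c, hc, List.contains_iff_mem.mpr hcd⟩
        rw [hdig] at h1
        exact (Bool.false_ne_true h1).elim
      · exact h
    · exact fun h => Or.inr h
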